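-- pv_equiv track=rewrite | github.com/walcorr/ES | Balanceamento.py | esta_balanceada
-- ===== SOURCE A (Python) =====
-- class Pilha():
--     def __init__(self):
--         self.pilha = []
--
--     def vazia(self):
--         return len(self.pilha)==0
--
--     def topo(self):
--         if len(self.pilha)!=0:
--             return self.pilha[-1]
--         else:
--             raise IndexError
--     def empilhar(self, valor):
--         self.pilha.append(valor)
--
--     def desempilhar(self):
--         if len(self.pilha)!=0:
--             return self.pilha.pop()
--         else:
--             raise IndexError
--
-- def esta_balanceada(expressao):
--     ca=Pilha()
--     co=Pilha()
--     pa=Pilha()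
--
--     for c in expressao:
--         if c=='[':
--             co.empilhar(0)
--         elif c=='{':
--             ca.empilhar(0)
--         elif c=='(':
--             pa.empilhar(0)
--         if c==']':
--             try:
--                 co.desempilhar()
--             except IndexError:
--                 return False
--         elif c=='}':
--             try:
--                 ca.desempilhar()
--             except IndexError:
--                 return False
--         elif c==')':
--             try:
--                 pa.desempilhar()
--             except IndexError:
--                 return False
--     if ca.vazia() and co.vazia() and pa.vazia():
--         return True
--     else:
--         return False
--     """
--     Função que calcula se expressão possui parenteses, colchetes e chaves balanceados
--     O Aluno deverá informar a complexidade de tempo e espaço da função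
--     Deverá ser usada como estrutura de dados apenas a pilha feita na aula anterior
--     :param expressao: string com expressao a ser balanceada
--     :return: boleano verdadeiro se expressao está balanceada e falso caso contrário
--     """
--     pass
-- ===== SOURCE B (Python) =====
-- def esta_balanceada(expressao):
--     def check(op, cl):
--         n = 0
--         for c in expressao:
--             if c == op:
--                 n += 1
--             elif c == cl:
--                 n -= 1
--                 if n < 0:
--                     return False
--         return n == 0
--     return check('(', ')') and check('[', ']') and check('{', '}')
-- ===== Notes on version B (the rewrite author's own statement) =====
-- stated objective: simpler
-- what changed: Replaces the single interleaved pass over three hand-rolled stacks with a small reusable helper that counts one bracket type per pass (three independent integer-counter scans), which matches A's independent-per-type semantics exactly.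
import Mathlib
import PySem

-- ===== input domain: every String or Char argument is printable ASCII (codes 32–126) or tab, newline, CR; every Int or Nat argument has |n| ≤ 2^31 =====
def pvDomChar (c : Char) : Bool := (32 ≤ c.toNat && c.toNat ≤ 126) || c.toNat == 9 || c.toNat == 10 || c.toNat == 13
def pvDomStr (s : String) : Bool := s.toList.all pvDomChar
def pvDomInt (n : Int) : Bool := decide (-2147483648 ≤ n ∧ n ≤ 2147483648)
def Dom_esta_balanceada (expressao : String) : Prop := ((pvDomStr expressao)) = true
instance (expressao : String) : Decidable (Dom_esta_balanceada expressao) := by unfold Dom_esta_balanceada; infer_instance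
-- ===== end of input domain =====

-- B replaces A's single pass over three hand-rolled stacks by three independent
-- integer-counter scans through one reusable helper (objective: simpler).

-- ===== PORT A =====
-- A's loop over the expression; the three Pilha objects are modelled as lists of
-- the pushed zeros (push = cons, pop = tail; only emptiness/length is ever used,
-- so head-side push/pop is exact), early 'return False' = returning false.
def pilhaLoop : List Char → List Int → List Int → List Int → Bool
  | [], ca, co, pa => ca.isEmpty && co.isEmpty && pa.isEmpty
  | c :: rest, ca, co, pa =>
    -- first if-chain: the pushes
    let st :=
      if c = '[' then (ca, (0:Int) :: co, pa)
      else if c = '{' then ((0:Int) :: ca, co, pa)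
      else if c = '(' then (ca, co, (0:Int) :: pa)
      else (ca, co, pa)
    -- second if-chain: the pops with try/except → return False on empty
    if c = ']' then
      match st.2.1 with
      | [] => false
      | _ :: t => pilhaLoop rest st.1 t st.2.2
    else if c = '}' then
      match st.1 with
      | [] => false
      | _ :: t => pilhaLoop rest t st.2.1 st.2.2
    else if c = ')' then
      match st.2.2 with
      | [] => false
      | _ :: t => pilhaLoop rest st.1 st.2.1 t
    else pilhaLoop rest st.1 st.2.1 st.2.2

def esta_balanceada (expressao : String) : Bool :=
  pilhaLoop expressao.toList [] [] []

-- ===== PORT B =====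
-- B's helper check(op, cl): one scan with an integer counter.
def checkLoop (op cl : Char) : List Char → Int → Bool
  | [], n => n == 0
  | c :: rest, n =>
    if c = op then checkLoop op cl rest (n + 1)
    else if c = cl then
      if n - 1 < 0 then false else checkLoop op cl rest (n - 1)
    else checkLoop op cl rest n

def esta_balanceada_alt (expressao : String) : Bool :=
  checkLoop '(' ')' expressao.toList 0 &&
    (checkLoop '[' ']' expressao.toList 0 && checkLoop '{' '}' expressao.toList 0)

-- ===== PRECONDITION & SPEC =====
def Spec_esta_balanceada (expressao : String) (out : Bool) : Prop := out = esta_balanceada_alt expressao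
instance (expressao : String) (out : Bool) : Decidable (Spec_esta_balanceada expressao out) := by unfold Spec_esta_balanceada; infer_instance

-- ===== CLAIM (what is proved, stated in full; the proofs are below) =====
def Claim_equal_esta_balanceada : Prop := ∀ (expressao : String), Dom_esta_balanceada expressao → Spec_esta_balanceada expressao (esta_balanceada expressao)

-- ===== LEMMAS AND PROOFS =====

-- Invariant: A's interleaved stack pass equals the three counter scans started at
-- the current stack heights.
lemma pilhaLoop_eq_checks : ∀ (cs : List Char) (ca co pa : List Int),
    pilhaLoop cs ca co pa =
      (checkLoop '(' ')' cs (pa.length : Int) &&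
        (checkLoop '[' ']' cs (co.length : Int) && checkLoop '{' '}' cs (ca.length : Int))) := by
  intro cs
  induction cs with
  | nil =>
    intro ca co pa
    cases ca <;> cases co <;> cases pa <;> simp [pilhaLoop, checkLoop] <;> omega
  | cons c rest ih =>
    intro ca co pa
    by_cases h1 : c = '['
    · subst h1; simp [pilhaLoop, checkLoop, ih]
    · by_cases h2 : c = '{'
      · subst h2; simp [pilhaLoop, checkLoop, ih]
      · by_cases h3 : c = '('
        · subst h3; simp [pilhaLoop, checkLoop, ih]
        · by_cases h4 : c = ']'
          · subst h4
            cases co with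
            | nil => simp [pilhaLoop, checkLoop]
            | cons x t =>
              have h0 : ¬ ((t.length : Int) < 0) := Int.not_lt.mpr (Int.natCast_nonneg _)
              simp [pilhaLoop, checkLoop, ih, h0]
          · by_cases h5 : c = '}'
            · subst h5
              cases ca with
              | nil => simp [pilhaLoop, checkLoop]
              | cons x t =>
                have h0 : ¬ ((t.length : Int) < 0) := Int.not_lt.mpr (Int.natCast_nonneg _)
                simp [pilhaLoop, checkLoop, ih, h0]
            · by_cases h6 : c = ')'
              · subst h6
                cases pa with
                | nil => simp [pilhaLoop, checkLoop]
                | cons x t =>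
                  have h0 : ¬ ((t.length : Int) < 0) := Int.not_lt.mpr (Int.natCast_nonneg _)
                  simp [pilhaLoop, checkLoop, ih, h0]
              · simp [pilhaLoop, checkLoop, h1, h2, h3, h4, h5, h6, ih]

-- ===== VERDICT (by name: the statement is the Claim_ definition above) =====
theorem esta_balanceada_spec : Claim_equal_esta_balanceada := by
  intro expressao _
  unfold Spec_esta_balanceada esta_balanceada esta_balanceada_alt
  simpa using pilhaLoop_eq_checks expressao.toList [] [] []
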